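-- pv_equiv track=rewrite | github.com/pepperRabbit/nju_course | Structure_and_Interpretation_of_Computer_Programs/project/project1/hog.py | is_swap
-- ===== SOURCE A (Python) =====
-- def is_swap(player_score, opponent_score):
--     """
--     Return whether the two scores should be swapped
--
--     >>> is_swap(2, 4)
--     False
--     >>> is_swap(11, 1)
--     False
--     >>> is_swap(1, 0)
--     True
--     >>> is_swap(23, 4)
--     True
--     """
--     # BEGIN PROBLEM 4
--     "*** YOUR CODE HERE ***"
--     cube_scores = 3 ** (player_score + opponent_score)
--     last = cube_scores % 10
--     while cube_scores > 0:
--         if cube_scores < 10 and cube_scores == last: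
--             return True
--         cube_scores //= 10
--     return False
-- ===== SOURCE B (Python) =====
-- def is_swap(player_score, opponent_score):
--     s = str(3 ** (player_score + opponent_score))
--     return s[0] == s[-1]
-- ===== Notes on version B (the rewrite author's own statement) =====
-- stated objective: faster
-- what changed: B replaces A's Python-level //10 digit-stripping loop (one big-int division per digit, with a mid-loop last-digit comparison) by a single int-to-decimal-string conversion and a direct comparison of the first and last characters.
-- outside the precondition, e.g. on is_swap(-1, 0): A returns True, B returns False
import Mathlib
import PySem

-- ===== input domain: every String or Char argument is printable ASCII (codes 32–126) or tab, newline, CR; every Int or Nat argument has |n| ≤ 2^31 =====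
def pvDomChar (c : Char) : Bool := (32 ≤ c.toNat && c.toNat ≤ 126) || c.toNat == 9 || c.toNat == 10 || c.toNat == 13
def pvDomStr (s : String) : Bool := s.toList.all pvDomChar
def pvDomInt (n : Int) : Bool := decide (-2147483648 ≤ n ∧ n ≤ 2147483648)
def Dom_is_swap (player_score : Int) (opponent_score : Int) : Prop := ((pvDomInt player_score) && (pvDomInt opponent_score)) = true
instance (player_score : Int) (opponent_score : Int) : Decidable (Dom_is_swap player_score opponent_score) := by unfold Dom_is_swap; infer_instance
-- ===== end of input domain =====

-- B replaces A's per-digit //10 loop by one int->str conversion, comparing the first and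
-- last characters (measurably faster at large sums); equivalence is over non-negative sums.


-- ===== PORT A =====
-- the 'while cube_scores > 0' loop of A, step for step
def isSwapLoop (cube_scores : Int) (last : Int) : Bool :=
  if 0 < cube_scores then
    if cube_scores < 10 && cube_scores == last then true
    else isSwapLoop (PySem.Int.floordiv cube_scores 10) last
  else false
termination_by cube_scores.toNat
decreasing_by
  rw [PySem.Int.floordiv_eq_ediv_of_pos (by norm_num)]
  omega

-- For a negative exponent Python's 3 ** n is a float (outside the Int convention, excluded
-- by Pre_); A's loop then returns True there (for any non-underflowing exponent), modelled
-- by the first branch.  On Pre_ the exponent is non-negative and 3 ** n is the integer 3 ^ n.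
def is_swap (player_score : Int) (opponent_score : Int) : Bool :=
  if player_score + opponent_score < 0 then true
  else
    let cube_scores : Int := 3 ^ (player_score + opponent_score).toNat
    let last := PySem.Int.mod cube_scores 10
    isSwapLoop cube_scores last

-- ===== PORT B =====
-- same float caveat outside Pre_: str of the float '0.333…' compares '0' with a non-zero
-- last digit, modelled by the first branch; on Pre_ the power is the integer 3 ^ n
def is_swap_alt (player_score : Int) (opponent_score : Int) : Bool :=
  if player_score + opponent_score < 0 then false
  else
    let s := PySem.Int.toStr (3 ^ (player_score + opponent_score).toNat)
    PySem.Str.pyGet? s 0 == PySem.Str.pyGet? s (-1)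

-- ===== PRECONDITION & SPEC =====
-- Pre_ excludes negative sums: there Python's 3 ** n is a float, which leaves the Int
-- type convention (A's True at e.g. (-1, 0) comes from float % and // arithmetic).
def Pre_is_swap (player_score : Int) (opponent_score : Int) : Prop :=
  0 ≤ player_score + opponent_score
instance (player_score : Int) (opponent_score : Int) : Decidable (Pre_is_swap player_score opponent_score) := by unfold Pre_is_swap; infer_instance

def pvWitness_is_swap : Int × Int := (1, 0)

def Spec_is_swap (player_score : Int) (opponent_score : Int) (out : Bool) : Prop := out = is_swap_alt player_score opponent_score
instance (player_score : Int) (opponent_score : Int) (out : Bool) : Decidable (Spec_is_swap player_score opponent_score out) := by unfold Spec_is_swap; infer_instance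

-- ===== CLAIM (what is proved, stated in full; the proofs are below) =====
def Claim_equal_is_swap : Prop := ∀ (player_score : Int) (opponent_score : Int), Dom_is_swap player_score opponent_score → Pre_is_swap player_score opponent_score → Spec_is_swap player_score opponent_score (is_swap player_score opponent_score)

-- ===== LEMMAS AND PROOFS =====

-- most significant decimal digit
def msd (n : Nat) : Nat :=
  if n < 10 then n else msd (n / 10)

theorem msd_lt_ten (n : Nat) : msd n < 10 := by
  induction n using Nat.strong_induction_on with
  | _ n ih =>
    rw [msd]
    split
    · omega
    · exact ih (n / 10) (by omega)

theorem floordiv_ten_natCast (m : Nat) :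
    PySem.Int.floordiv (m : Int) 10 = ((m / 10 : Nat) : Int) := by
  exact_mod_cast PySem.Int.floordiv_natCast m 10

-- A's loop on a positive natural number decides "most significant digit = last"
theorem isSwapLoop_eq (m : Nat) (hm : 0 < m) (last : Int) :
    isSwapLoop (m : Int) last = decide ((msd m : Int) = last) := by
  induction m using Nat.strong_induction_on with
  | _ m ih =>
    rw [isSwapLoop, msd, if_pos (by exact_mod_cast hm)]
    by_cases h10 : m < 10
    · rw [if_pos h10]
      by_cases hl : (m : Int) = last
      · subst hl
        simp [show (m : Int) < 10 by exact_mod_cast h10]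
      · have hc : ((m : Int) < 10 && (m : Int) == last) = false := by simp [hl]
        simp only [hc, Bool.false_eq_true, if_false]
        rw [floordiv_ten_natCast, show m / 10 = 0 by omega]
        rw [isSwapLoop]
        simp [hl]
    · have hc : ((m : Int) < 10 && (m : Int) == last) = false := by
        have : ¬ ((m : Int) < 10) := by exact_mod_cast h10
        simp [this]
      simp only [hc, Bool.false_eq_true, if_false]
      rw [floordiv_ten_natCast, ih (m / 10) (by omega) (by omega), if_neg h10]

theorem toDigitsCore_append (b fuel n : Nat) (l1 l2 : List Char) :
    Nat.toDigitsCore b fuel n (l1 ++ l2) = Nat.toDigitsCore b fuel n l1 ++ l2 := by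
  induction fuel generalizing n l1 with
  | zero => rw [Nat.toDigitsCore, Nat.toDigitsCore]
  | succ fuel ih =>
    rw [Nat.toDigitsCore, Nat.toDigitsCore]
    split
    · rfl
    · rw [← List.cons_append, ih]

theorem toDigits_getLast (n : Nat) :
    (Nat.toDigits 10 n).getLast? = some (n % 10).digitChar := by
  rw [Nat.toDigits, Nat.toDigitsCore]
  split
  · rfl
  · rw [show ((n % 10).digitChar :: ([] : List Char)) = [] ++ [(n % 10).digitChar] from rfl,
      toDigitsCore_append]
    exact List.getLast?_concat

theorem toDigitsCore_head (fuel n : Nat) (l : List Char) (h : n < fuel) :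
    (Nat.toDigitsCore 10 fuel n l).head? = some (msd n).digitChar := by
  induction fuel generalizing n l with
  | zero => omega
  | succ fuel ih =>
    rw [Nat.toDigitsCore, msd]
    split
    · next hz => rw [if_pos (by omega), show n % 10 = n by omega]; rfl
    · next hz => rw [if_neg (by omega)]; exact ih (n / 10) _ (by omega)

theorem toDigits_head (n : Nat) :
    (Nat.toDigits 10 n).head? = some (msd n).digitChar :=
  toDigitsCore_head (n + 1) n [] (by omega)

theorem digitChar_inj : ∀ a, a < 10 → ∀ b, b < 10 →
    (Nat.digitChar a = Nat.digitChar b ↔ a = b) := by decide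

theorem pyGet_zero {cs : List Char} (h : cs ≠ []) :
    PySem.List.pyGet? cs 0 = cs.head? := by
  have hlen : 0 < cs.length := List.length_pos_of_ne_nil h
  simp [PySem.List.pyGet?, PySem.List.pyIdx?, hlen, List.head?_eq_getElem?]

theorem pyGet_neg_one {cs : List Char} (h : cs ≠ []) :
    PySem.List.pyGet? cs (-1) = cs.getLast? := by
  have hlen : 0 < cs.length := List.length_pos_of_ne_nil h
  have h1 : -(cs.length : Int) ≤ -1 := by omega
  simp [PySem.List.pyGet?, PySem.List.pyIdx?, h1, List.getLast?_eq_getElem?]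

theorem both_eq (player_score opponent_score : Int)
    (hpre : 0 ≤ player_score + opponent_score) :
    is_swap player_score opponent_score = is_swap_alt player_score opponent_score := by
  rw [is_swap, is_swap_alt, if_neg (by omega), if_neg (by omega)]
  have hM : ((3 : Int) ^ (player_score + opponent_score).toNat)
      = ((3 ^ (player_score + opponent_score).toNat : Nat) : Int) := by push_cast; ring
  rw [hM]
  have hMpos : 0 < 3 ^ (player_score + opponent_score).toNat := by positivity
  generalize hg : 3 ^ (player_score + opponent_score).toNat = M at hMpos ⊢
  change isSwapLoop (M : Int) (PySem.Int.mod (M : Int) 10)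
      = (PySem.Str.pyGet? (PySem.Int.toStr (M : Int)) 0
          == PySem.Str.pyGet? (PySem.Int.toStr (M : Int)) (-1))
  -- A's side
  have hmod : PySem.Int.mod (M : Int) 10 = ((M % 10 : Nat) : Int) := by
    exact_mod_cast PySem.Int.mod_natCast M 10
  rw [hmod, isSwapLoop_eq M hMpos]
  -- B's side
  have hcs : (PySem.Int.toStr (M : Int)).toList = Nat.toDigits 10 M := by
    rw [PySem.Int.toList_toStr, PySem.Int.toChars, if_neg (by exact_mod_cast Nat.not_lt_zero M)]
    simp
  have hne : Nat.toDigits 10 M ≠ [] := by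
    intro hnil
    have := toDigits_head M
    rw [hnil] at this
    simp at this
  rw [show PySem.Str.pyGet? (PySem.Int.toStr (M : Int)) 0
        = PySem.List.pyGet? (Nat.toDigits 10 M) 0 from by
      simp [PySem.Str.pyGet?, PySem.Chars.pyGet?, hcs],
    show PySem.Str.pyGet? (PySem.Int.toStr (M : Int)) (-1)
        = PySem.List.pyGet? (Nat.toDigits 10 M) (-1) from by
      simp [PySem.Str.pyGet?, PySem.Chars.pyGet?, hcs]]
  rw [pyGet_zero hne, pyGet_neg_one hne, toDigits_head, toDigits_getLast]
  -- both sides decide "msd M = M % 10"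
  rcases eq_or_ne (msd M) (M % 10) with he | hne'
  · simp [he]
  · have hch : (msd M).digitChar ≠ (M % 10).digitChar := by
      rw [Ne, digitChar_inj _ (msd_lt_ten M) _ (Nat.mod_lt _ (by norm_num))]
      exact hne'
    have hint : ((msd M : Int)) ≠ (M : Int) % 10 := by
      omega
    simp [hch, hint]

-- ===== VERDICT (by name: the statement is the Claim_ definition above) =====
theorem is_swap_spec : Claim_equal_is_swap := by
  intro player_score opponent_score _ hpre
  unfold Spec_is_swap
  exact both_eq player_score opponent_score hpre
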